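-- pv_equiv track=rewrite | github.com/sakshidalmiya02/Leetcode | Mother Vertex - GFG/mother-vertex.py | findMotherVertex
-- ===== SOURCE A (Python) =====
-- def findMotherVertex(V, adj):
-- 	#Code here
--
-- 	def dfs(i,vis,adj):
--
-- 	    vis[i]=True
-- 	    for y in adj[i]:
-- 	        if vis[y]==False:
-- 	            dfs(y,vis,adj)
--
-- 	vis=[False]*V
-- 	for i in range(V):
-- 	    if vis[i]==False:
-- 	        dfs(i,vis,adj)
-- 	        mother=i
--
-- 	vis=[False]*V
-- 	dfs(mother,vis,adj)
-- 	for i in vis: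
-- 	    if i==False:
-- 	        return -1
-- 	return mother
-- ===== SOURCE B (Python) =====
-- def findMotherVertex(V, adj):
--     # breadth-first search with frontier levels instead of recursive DFS
--     def bfs(start, vis):
--         vis[start] = True
--         frontier = [start]
--         while frontier:
--             nxt = []
--             for u in frontier:
--                 for y in adj[u]:
--                     if not vis[y]:
--                         vis[y] = True
--                         nxt.append(y)
--             frontier = nxt
--
--     vis = [False] * V
--     mother = 0
--     for i in range(V):
--         if not vis[i]:
--             bfs(i, vis)
--             mother = i
--
--     vis = [False] * V
--     bfs(mother, vis)
--     return mother if all(vis) else -1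
-- ===== Notes on version B (the rewrite author's own statement) =====
-- stated objective: alternative
-- what changed: The recursive depth-first helper is replaced by a breadth-first search over frontier levels (mark on discovery, build the next frontier from unvisited neighbours); the two-phase mother-vertex scan is kept and the final check becomes all(vis).
-- outside the precondition, e.g. on findMotherVertex(4, [[3], [3, 2, -2], [-4, 2, 2], [-2, 2], [-3, 1, -1]]): A returns -1, B returns 1; on findMotherVertex(5, [[-1, 3, 3], [-2, 4], [], [0], [0, 1], [4, 2]]): A returns 1, B returns -1
import Mathlib
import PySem

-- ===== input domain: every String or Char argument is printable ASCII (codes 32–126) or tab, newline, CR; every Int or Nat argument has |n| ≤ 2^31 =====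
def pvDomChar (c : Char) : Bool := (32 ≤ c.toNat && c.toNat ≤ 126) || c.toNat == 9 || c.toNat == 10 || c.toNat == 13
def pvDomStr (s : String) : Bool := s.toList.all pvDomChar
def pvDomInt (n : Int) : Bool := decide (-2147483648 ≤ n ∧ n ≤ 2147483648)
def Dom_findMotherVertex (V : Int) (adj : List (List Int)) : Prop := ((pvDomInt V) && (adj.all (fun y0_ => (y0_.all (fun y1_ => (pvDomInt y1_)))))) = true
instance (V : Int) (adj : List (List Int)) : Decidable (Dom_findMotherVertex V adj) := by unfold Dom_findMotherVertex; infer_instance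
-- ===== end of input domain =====

-- B replaces A's recursive depth-first search by a breadth-first search over frontier
-- levels (mark on discovery, next frontier from unvisited neighbours); the two-phase
-- mother-vertex scan is kept; equivalence of the RETURN value is proved on
-- well-formed graphs (Pre_).  (A and B both mutate only local lists in Python.)

-- shared Python-primitive abbreviations: the reads/writes vis[u], vis[u] = True and adj[u]
-- (defaults are never reached under Pre_)
def pvGet (vis : List Bool) (u : Int) : Bool := PySem.List.pyGetD vis u true
def pvSet (vis : List Bool) (u : Int) : List Bool := PySem.List.pySetD vis u true
def pvNbr (adj : List (List Int)) (u : Int) : List Int := PySem.List.pyGetD adj u []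

-- ===== PORT A =====
-- recursive dfs; the fuel (V+1 bounds the recursion depth) is only a totality guard
def dfsA (adj : List (List Int)) : Nat → Int → List Bool → List Bool
  | 0, _, vis => vis
  | fuel+1, i, vis =>
    (pvNbr adj i).foldl
      (fun c y => if pvGet c y = false then dfsA adj fuel y c else c)
      (pvSet vis i)

def findMotherVertex (V : Int) (adj : List (List Int)) : Int :=
  let fuel := V.toNat + 1
  -- first pass: dfs from every not-yet-visited i, remembering the last such i as mother
  -- (mother is initialised to 0: under Pre_ (V ≥ 1) Python assigns mother at i = 0 anyway)
  let s := (PySem.List.pyRange 0 V 1).foldl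
      (fun (st : List Bool × Int) i =>
        if pvGet st.1 i = false then (dfsA adj fuel i st.1, i) else st)
      (List.replicate V.toNat false, 0)
  -- second pass: dfs from mother; "for i in vis: if i==False: return -1; return mother"
  let vis2 := dfsA adj fuel s.2 (List.replicate V.toNat false)
  if vis2.contains false then -1 else s.2

-- ===== PORT B =====
-- breadth-first search: "if not vis[y]: vis[y] = True; nxt.append(y)" on one neighbour
def pushF (st : List Int × List Bool) (y : Int) : List Int × List Bool :=
  if pvGet st.2 y = false then (st.1 ++ [y], pvSet st.2 y) else st

-- "for y in adj[u]: …" — expand one frontier vertex into the (nxt, vis) state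
def bfsStep (adj : List (List Int)) (st : List Int × List Bool) (u : Int) : List Int × List Bool :=
  (pvNbr adj u).foldl pushF st

-- "while frontier: nxt = []; for u in frontier: …; frontier = nxt"
-- (the fuel is only a totality guard for the while loop: each level marks a vertex)
def bfsLoop (adj : List (List Int)) : Nat → List Int → List Bool → List Bool
  | 0, _, vis => vis
  | _+1, [], vis => vis
  | fuel+1, u :: rest, vis =>
    let st := (u :: rest).foldl (bfsStep adj) ([], vis)
    bfsLoop adj fuel st.1 st.2

-- "vis[start] = True; frontier = [start]; while frontier: …"
def bfsB (adj : List (List Int)) (fuel : Nat) (start : Int) (vis : List Bool) : List Bool :=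
  bfsLoop adj fuel [start] (pvSet vis start)

def findMotherVertex_alt (V : Int) (adj : List (List Int)) : Int :=
  let fuel := V.toNat + 2
  let s := (PySem.List.pyRange 0 V 1).foldl
      (fun (st : Int × List Bool) i =>
        if pvGet st.2 i = false then (i, bfsB adj fuel i st.2) else st)
      (0, List.replicate V.toNat false)
  let vis2 := bfsB adj fuel s.1 (List.replicate V.toNat false)
  if vis2.all (fun b => b) then s.1 else -1

-- ===== PRECONDITION & SPEC =====
-- Pre_ restricts to well-formed graphs: V ≥ 1, a row for each of the vertices 0..V-1,
-- neighbours in [-V,V) (a negative neighbour is Python's wraparound alias of vertex V+y,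
-- admitted when len(adj) = V, where the alias is consistent).  Outside it A raises
-- (NameError for V ≤ 0, IndexError for a missing row or a neighbour out of [-V,V)), or —
-- for a negative neighbour with len(adj) > V — the alias reads a row belonging to no
-- vertex and the result depends on traversal order, so A's and B's values are both
-- accidental there.
def Pre_findMotherVertex (V : Int) (adj : List (List Int)) : Prop :=
  1 ≤ V ∧ V ≤ (adj.length : Int) ∧
    ∀ row ∈ adj.take V.toNat, ∀ y ∈ row,
      -V ≤ y ∧ y < V ∧ (y < 0 → (adj.length : Int) = V)
instance (V : Int) (adj : List (List Int)) : Decidable (Pre_findMotherVertex V adj) := by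
  unfold Pre_findMotherVertex; infer_instance

def pvWitness_findMotherVertex : Int × List (List Int) := (3, [[1], [2], [0]])

def Spec_findMotherVertex (V : Int) (adj : List (List Int)) (out : Int) : Prop := out = findMotherVertex_alt V adj
instance (V : Int) (adj : List (List Int)) (out : Int) : Decidable (Spec_findMotherVertex V adj out) := by unfold Spec_findMotherVertex; infer_instance

-- ===== CLAIM (what is proved, stated in full; the proofs are below) =====
def Claim_equal_findMotherVertex : Prop := ∀ (V : Int) (adj : List (List Int)), Dom_findMotherVertex V adj → Pre_findMotherVertex V adj → Spec_findMotherVertex V adj (findMotherVertex V adj)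

-- ===== LEMMAS AND PROOFS =====

-- reachability in the digraph; vertices in range, rows good
def Reach (adj : List (List Int)) : Int → Int → Prop :=
  Relation.ReflTransGen (fun a b => b ∈ pvNbr adj a)

def Good (adj : List (List Int)) (n : Nat) : Prop :=
  ∀ u : Int, 0 ≤ u → u < (n : Int) → ∀ y ∈ pvNbr adj u, 0 ≤ y ∧ y < (n : Int)

def Closed (adj : List (List Int)) (n : Nat) (vis : List Bool) : Prop :=
  ∀ u : Int, 0 ≤ u → u < (n : Int) → pvGet vis u = true →
    ∀ y ∈ pvNbr adj u, pvGet vis y = true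

-- pointwise "only marks more" order
def Mono (a b : List Bool) : Prop := List.Forall₂ (fun x y => x = true → y = true) a b

theorem mono_refl (a : List Bool) : Mono a a := by
  induction a with
  | nil => exact List.Forall₂.nil
  | cons x xs ih => exact List.Forall₂.cons (fun h => h) ih

theorem mono_trans {a b c : List Bool} (h1 : Mono a b) (h2 : Mono b c) : Mono a c := by
  induction h1 generalizing c with
  | nil => cases h2; exact List.Forall₂.nil
  | cons hxy _ ih =>
    cases h2 with
    | cons hyz h2' => exact List.Forall₂.cons (fun h => hyz (hxy h)) (ih h2')

theorem mono_length {a b : List Bool} (h : Mono a b) : a.length = b.length :=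
  List.Forall₂.length_eq h

theorem mono_set (a : List Bool) (k : Nat) : Mono a (a.set k true) := by
  induction a generalizing k with
  | nil => exact List.Forall₂.nil
  | cons x xs ih =>
    cases k with
    | zero => exact List.Forall₂.cons (fun _ => rfl) (mono_refl xs)
    | succ k => exact List.Forall₂.cons (fun h => h) (ih k)

theorem mono_get {a b : List Bool} (h : Mono a b) {j : Nat} (hj : j < a.length)
    (hv : a[j] = true) : b[j]'(by rw [← mono_length h]; exact hj) = true := by
  induction h generalizing j with
  | nil => simp at hj
  | cons hxy h' ih =>
    cases j with
    | zero => exact hxy hv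
    | succ j => exact ih (by simpa using hj) hv

theorem cf_mono {a b : List Bool} (h : Mono a b) : b.count false ≤ a.count false := by
  induction h with
  | nil => simp
  | cons hxy h' ih =>
    rename_i x y _ _
    cases x with
    | false => cases y <;> simp <;> omega
    | true => have := hxy rfl; subst this; simp; omega

theorem cf_strict {a b : List Bool} (h : Mono a b) {j : Nat} (hj : j < a.length)
    (ha : a[j] = false) (hb : b[j]'(by rw [← mono_length h]; exact hj) = true) :
    b.count false < a.count false := by
  induction h generalizing j with
  | nil => simp at hj
  | cons hxy h' ih =>
    rename_i x y xs ys
    cases j with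
    | zero =>
      simp at ha hb
      subst ha; subst hb
      have := cf_mono h'
      simp; omega
    | succ j =>
      have hlt := ih (by simpa using hj) (by simpa using ha) (by simpa using hb)
      cases x with
      | true =>
        have := hxy rfl; subst this
        simp; omega
      | false => cases y <;> simp <;> omega

theorem cf_set {vis : List Bool} {k : Nat} (hk : k < vis.length) (hv : vis[k] = false) :
    (vis.set k true).count false + 1 = vis.count false := by
  induction vis generalizing k with
  | nil => simp at hk
  | cons x xs ih =>
    cases k with
    | zero => simp at hv; subst hv; simp
    | succ k =>
      simp only [List.set_cons_succ, List.count_cons]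
      have := ih (by simpa using hk) (by simpa using hv)
      omega

theorem cf_pos {vis : List Bool} {k : Nat} (hk : k < vis.length) (hv : vis[k] = false) :
    1 ≤ vis.count false := by
  have : false ∈ vis := hv ▸ List.getElem_mem hk
  exact List.count_pos_iff.2 (by simpa using this)

-- bridges between Int-indexed primitives and Nat getElem
theorem pvGet_eq {vis : List Bool} {u : Int} (h0 : 0 ≤ u) (h1 : u < (vis.length : Int)) :
    pvGet vis u = vis[u.toNat]'(by omega) := by
  unfold pvGet
  rw [PySem.List.pyGetD_eq_getElem vis true h0 h1]

theorem pvSet_eq {vis : List Bool} {u : Int} (h0 : 0 ≤ u) :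
    pvSet vis u = vis.set u.toNat true := by
  unfold pvSet
  rw [PySem.List.pySetD_of_nonneg vis true h0]

theorem pvGet_set {vis : List Bool} {u j : Int} (hu0 : 0 ≤ u) (_hu1 : u < (vis.length : Int))
    (hj0 : 0 ≤ j) (hj1 : j < (vis.length : Int)) :
    pvGet (pvSet vis u) j = if j = u then true else pvGet vis j := by
  rw [pvSet_eq hu0, pvGet_eq hj0 (by simpa using hj1), pvGet_eq hj0 hj1]
  rw [List.getElem_set]
  by_cases h : j = u
  · have : u.toNat = j.toNat := by omega
    simp [h, this]
  · have : u.toNat ≠ j.toNat := by omega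
    simp [h, this]

theorem length_pvSet (vis : List Bool) (u : Int) : (pvSet vis u).length = vis.length := by
  unfold pvSet
  exact PySem.List.length_pySetD vis u true

theorem mono_pvSet (vis : List Bool) (u : Int) (h0 : 0 ≤ u) : Mono vis (pvSet vis u) := by
  rw [pvSet_eq h0]; exact mono_set vis u.toNat

theorem mono_pvGet {a b : List Bool} (h : Mono a b) {u : Int} (h0 : 0 ≤ u)
    (h1 : u < (a.length : Int)) (hv : pvGet a u = true) : pvGet b u = true := by
  rw [pvGet_eq h0 h1] at hv
  rw [pvGet_eq h0 (by rw [← mono_length h]; exact h1)]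
  exact mono_get h (by omega) hv

theorem mono_foldl {α : Type} {f : List Bool → α → List Bool} {l : List α} {c : List Bool}
    (hf : ∀ c y, y ∈ l → Mono c (f c y)) : Mono c (l.foldl f c) := by
  induction l generalizing c with
  | nil => exact mono_refl c
  | cons y ys ih =>
    exact mono_trans (hf c y (by simp)) (ih (fun c y hy => hf c y (by simp [hy])))

-- ===== A-side characterisation (unchanged from the dfs analysis) =====

theorem dfsA_mono (adj : List (List Int)) (n : Nat) (hg : Good adj n) :
    ∀ (fuel : Nat) (i : Int) (vis : List Bool), 0 ≤ i → i < (n : Int) →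
      Mono vis (dfsA adj fuel i vis) := by
  intro fuel
  induction fuel with
  | zero => intro i vis _ _; exact mono_refl vis
  | succ fuel ih =>
    intro i vis hi0 hi1
    simp only [dfsA]
    refine mono_trans (mono_pvSet vis i hi0) (mono_foldl ?_)
    intro c y hy
    by_cases h : pvGet c y = false
    · rw [if_pos h]
      exact ih y c (hg i hi0 hi1 y hy).1 (hg i hi0 hi1 y hy).2
    · rw [if_neg h]; exact mono_refl c

theorem dfsA_upper (adj : List (List Int)) (n : Nat) (hg : Good adj n) :
    ∀ fuel (i : Int) (vis : List Bool), vis.length = n → 0 ≤ i → i < (n : Int) →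
      ∀ j : Int, 0 ≤ j → j < (n : Int) →
        pvGet (dfsA adj fuel i vis) j = true → pvGet vis j = true ∨ Reach adj i j := by
  intro fuel
  induction fuel with
  | zero => intro i vis _ _ _ j _ _ h; exact Or.inl h
  | succ fuel ih =>
    intro i vis hlen hi0 hi1 j hj0 hj1 h
    simp only [dfsA] at h
    have main : ∀ (ys : List Int), (∀ y ∈ ys, y ∈ pvNbr adj i) →
        (∀ y ∈ ys, 0 ≤ y ∧ y < (n : Int)) →
        ∀ (c : List Bool), c.length = n →
        (∀ j : Int, 0 ≤ j → j < (n : Int) → pvGet c j = true →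
          pvGet vis j = true ∨ Reach adj i j) →
        ((ys.foldl (fun c y => if pvGet c y = false then dfsA adj fuel y c else c) c).length = n ∧
         ∀ j : Int, 0 ≤ j → j < (n : Int) →
          pvGet (ys.foldl (fun c y => if pvGet c y = false then dfsA adj fuel y c else c) c) j = true →
          pvGet vis j = true ∨ Reach adj i j) := by
      intro ys
      induction ys with
      | nil => intro _ _ c hc hinv; exact ⟨hc, hinv⟩
      | cons y ys ihy =>
        intro hmem hys c hc hinv
        simp only [List.foldl_cons]
        by_cases hy : pvGet c y = false
        · rw [if_pos hy]
          have hyr := hys y (by simp)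
          have hlen' : (dfsA adj fuel y c).length = n := by
            rw [← mono_length (dfsA_mono adj n hg fuel y c hyr.1 hyr.2)]; exact hc
          refine ihy (fun z hz => hmem z (by simp [hz])) (fun z hz => hys z (by simp [hz])) _ hlen' ?_
          intro k hk0 hk1 hkt
          rcases ih y c hc hyr.1 hyr.2 k hk0 hk1 hkt with h1 | h2
          · exact hinv k hk0 hk1 h1
          · exact Or.inr (Relation.ReflTransGen.trans
              (Relation.ReflTransGen.single (hmem y (by simp))) h2)
        · rw [if_neg hy]
          exact ihy (fun z hz => hmem z (by simp [hz])) (fun z hz => hys z (by simp [hz])) c hc hinv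
    have base : ∀ j : Int, 0 ≤ j → j < (n : Int) → pvGet (pvSet vis i) j = true →
        pvGet vis j = true ∨ Reach adj i j := by
      intro k hk0 hk1 hkt
      rw [pvGet_set hi0 (by omega) hk0 (by omega)] at hkt
      by_cases hki : k = i
      · exact Or.inr (hki ▸ Relation.ReflTransGen.refl)
      · rw [if_neg hki] at hkt; exact Or.inl hkt
    exact (main (pvNbr adj i) (fun y hy => hy) (fun y hy => hg i hi0 hi1 y hy) (pvSet vis i)
      (by rw [length_pvSet]; exact hlen) base).2 j hj0 hj1 h

theorem dfsA_lower (adj : List (List Int)) (n : Nat) (hg : Good adj n) :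
    ∀ fuel (i : Int) (vis : List Bool), vis.length = n → 0 ≤ i → i < (n : Int) →
      pvGet vis i = false → vis.count false ≤ fuel →
      pvGet (dfsA adj fuel i vis) i = true ∧
      (∀ u : Int, 0 ≤ u → u < (n : Int) → pvGet vis u = false →
        pvGet (dfsA adj fuel i vis) u = true →
        ∀ y ∈ pvNbr adj u, pvGet (dfsA adj fuel i vis) y = true) := by
  intro fuel
  induction fuel with
  | zero =>
    intro i vis hlen hi0 hi1 hvi hcf
    exfalso
    have h1 : vis[i.toNat]'(by omega) = false := by
      rw [← pvGet_eq hi0 (by omega)]; exact hvi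
    have := cf_pos (vis := vis) (k := i.toNat) (by omega) h1
    omega
  | succ fuel ih =>
    intro i vis hlen hi0 hi1 hvi hcf
    simp only [dfsA]
    have hc0len : (pvSet vis i).length = n := by rw [length_pvSet]; exact hlen
    have hcfc0 : (pvSet vis i).count false + 1 = vis.count false := by
      rw [pvSet_eq hi0]
      exact cf_set (by omega) (by rw [← pvGet_eq hi0 (by omega)]; exact hvi)
    have hc0i : pvGet (pvSet vis i) i = true := by
      rw [pvGet_set hi0 (by omega) hi0 (by omega)]; simp
    have aux : ∀ (ys : List Int), (∀ y ∈ ys, 0 ≤ y ∧ y < (n : Int)) →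
        ∀ (c : List Bool), c.length = n → Mono (pvSet vis i) c →
        (∀ u : Int, 0 ≤ u → u < (n : Int) → pvGet (pvSet vis i) u = false →
          pvGet c u = true → ∀ y ∈ pvNbr adj u, pvGet c y = true) →
        ((ys.foldl (fun c y => if pvGet c y = false then dfsA adj fuel y c else c) c).length = n ∧
         Mono c (ys.foldl (fun c y => if pvGet c y = false then dfsA adj fuel y c else c) c) ∧
         (∀ u : Int, 0 ≤ u → u < (n : Int) → pvGet (pvSet vis i) u = false →
           pvGet (ys.foldl (fun c y => if pvGet c y = false then dfsA adj fuel y c else c) c) u = true →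
           ∀ y ∈ pvNbr adj u,
             pvGet (ys.foldl (fun c y => if pvGet c y = false then dfsA adj fuel y c else c) c) y = true) ∧
         (∀ y ∈ ys, pvGet (ys.foldl (fun c y => if pvGet c y = false then dfsA adj fuel y c else c) c) y = true)) := by
      intro ys
      induction ys with
      | nil =>
        intro _ c hc hm hcl
        exact ⟨hc, mono_refl c, hcl, by simp⟩
      | cons y ys ihy =>
        intro hys c hc hm hcl
        have hyr := hys y (by simp)
        simp only [List.foldl_cons]
        by_cases hy : pvGet c y = false
        · rw [if_pos hy]
          have hcfc : c.count false ≤ fuel := by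
            have := cf_mono hm; omega
          have hrec := ih y c hc hyr.1 hyr.2 hy hcfc
          have hm1 : Mono c (dfsA adj fuel y c) := dfsA_mono adj n hg fuel y c hyr.1 hyr.2
          have hc1 : (dfsA adj fuel y c).length = n := by rw [← mono_length hm1]; exact hc
          have hcl1 : ∀ u : Int, 0 ≤ u → u < (n : Int) → pvGet (pvSet vis i) u = false →
              pvGet (dfsA adj fuel y c) u = true →
              ∀ z ∈ pvNbr adj u, pvGet (dfsA adj fuel y c) z = true := by
            intro u hu0 hu1 hcu0 hcu1 z hz
            by_cases hcu : pvGet c u = true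
            · have hz' := hg u hu0 hu1 z hz
              exact mono_pvGet hm1 hz'.1 (by rw [hc]; exact hz'.2) (hcl u hu0 hu1 hcu0 hcu z hz)
            · have hcuf : pvGet c u = false := by revert hcu; cases pvGet c u <;> simp
              exact hrec.2 u hu0 hu1 hcuf hcu1 z hz
          have hres := ihy (fun z hz => hys z (by simp [hz])) _ hc1 (mono_trans hm hm1) hcl1
          refine ⟨hres.1, mono_trans hm1 hres.2.1, hres.2.2.1, ?_⟩
          intro z hz
          rcases List.mem_cons.1 hz with rfl | hz'
          · exact mono_pvGet hres.2.1 hyr.1 (by rw [hc1]; exact hyr.2) hrec.1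
          · exact hres.2.2.2 z hz'
        · rw [if_neg hy]
          have hres := ihy (fun z hz => hys z (by simp [hz])) c hc hm hcl
          refine ⟨hres.1, hres.2.1, hres.2.2.1, ?_⟩
          intro z hz
          rcases List.mem_cons.1 hz with rfl | hz'
          · have hyt : pvGet c z = true := by revert hy; cases pvGet c z <;> simp
            exact mono_pvGet hres.2.1 hyr.1 (by rw [hc]; exact hyr.2) hyt
          · exact hres.2.2.2 z hz'
    have hres := aux (pvNbr adj i) (fun y hy => hg i hi0 hi1 y hy) (pvSet vis i)
      hc0len (mono_refl _) (by intro u _ _ h1 h2 _ _; rw [h1] at h2; exact absurd h2 (by simp))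
    refine ⟨mono_pvGet hres.2.1 hi0 (by rw [hc0len]; exact hi1) hc0i, ?_⟩
    intro u hu0 hu1 hvu hru z hz
    by_cases hui : u = i
    · exact hres.2.2.2 z (by rw [← hui]; exact hz)
    · have hc0u : pvGet (pvSet vis i) u = false := by
        rw [pvGet_set hi0 (by omega) hu0 (by omega), if_neg hui]; exact hvu
      exact hres.2.2.1 u hu0 hu1 hc0u hru z hz

theorem reach_marked (adj : List (List Int)) (n : Nat) (hg : Good adj n) (r : List Bool)
    (hcl : ∀ u : Int, 0 ≤ u → u < (n : Int) → pvGet r u = true →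
      ∀ y ∈ pvNbr adj u, pvGet r y = true)
    {i j : Int} (hi0 : 0 ≤ i) (hi1 : i < (n : Int)) (hri : pvGet r i = true)
    (hreach : Reach adj i j) : (0 ≤ j ∧ j < (n : Int)) ∧ pvGet r j = true := by
  induction hreach with
  | refl => exact ⟨⟨hi0, hi1⟩, hri⟩
  | tail _ hstep ih =>
    rename_i b c _
    have hb := ih
    have hc := hg b hb.1.1 hb.1.2 c hstep
    exact ⟨hc, hcl b hb.1.1 hb.1.2 hb.2 c hstep⟩

theorem dfsA_char (adj : List (List Int)) (n : Nat) (hg : Good adj n)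
    (i : Int) (vis : List Bool) (hlen : vis.length = n) (hi0 : 0 ≤ i) (hi1 : i < (n : Int))
    (hvi : pvGet vis i = false) (hcl : Closed adj n vis)
    {fa : Nat} (hfa : vis.count false ≤ fa) :
    (dfsA adj fa i vis).length = n ∧
    ∀ j : Int, 0 ≤ j → j < (n : Int) →
      (pvGet (dfsA adj fa i vis) j = true ↔ pvGet vis j = true ∨ Reach adj i j) := by
  have hmono := dfsA_mono adj n hg fa i vis hi0 hi1
  have hlen2 : (dfsA adj fa i vis).length = n := by rw [← mono_length hmono]; exact hlen
  have hlow := dfsA_lower adj n hg fa i vis hlen hi0 hi1 hvi hfa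
  have hclr : ∀ u : Int, 0 ≤ u → u < (n : Int) → pvGet (dfsA adj fa i vis) u = true →
      ∀ y ∈ pvNbr adj u, pvGet (dfsA adj fa i vis) y = true := by
    intro u hu0 hu1 hru y hy
    by_cases hvu : pvGet vis u = true
    · exact mono_pvGet hmono (hg u hu0 hu1 y hy).1
        (by rw [hlen]; exact (hg u hu0 hu1 y hy).2) (hcl u hu0 hu1 hvu y hy)
    · exact hlow.2 u hu0 hu1 (by revert hvu; cases pvGet vis u <;> simp) hru y hy
  refine ⟨hlen2, ?_⟩
  intro j hj0 hj1
  constructor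
  · exact dfsA_upper adj n hg fa i vis hlen hi0 hi1 j hj0 hj1
  · rintro (h | h)
    · exact mono_pvGet hmono hj0 (by rw [hlen]; exact hj1) h
    · exact (reach_marked adj n hg _ hclr hi0 hi1 hlow.1 h).2

-- ===== B-side: analysis of the BFS level fold =====

-- the neighbour fold of one frontier vertex: complete characterisation
theorem nfold (n : Nat) :
    ∀ (ys : List Int), (∀ y ∈ ys, 0 ≤ y ∧ y < (n : Int)) →
    ∀ (q : List Int) (vis : List Bool), vis.length = n →
      ((ys.foldl pushF (q, vis)).2.length = n) ∧
      Mono vis (ys.foldl pushF (q, vis)).2 ∧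
      (∀ j : Int, 0 ≤ j → j < (n : Int) → pvGet (ys.foldl pushF (q, vis)).2 j = true →
        pvGet vis j = true ∨ j ∈ ys) ∧
      (∀ y ∈ ys, pvGet (ys.foldl pushF (q, vis)).2 y = true) ∧
      (∀ j, j ∈ (ys.foldl pushF (q, vis)).1 →
        j ∈ q ∨ (0 ≤ j ∧ j < (n : Int) ∧ pvGet vis j = false ∧
          pvGet (ys.foldl pushF (q, vis)).2 j = true)) ∧
      (∀ j ∈ q, j ∈ (ys.foldl pushF (q, vis)).1) ∧
      (∀ j : Int, 0 ≤ j → j < (n : Int) → pvGet vis j = false →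
        pvGet (ys.foldl pushF (q, vis)).2 j = true → j ∈ (ys.foldl pushF (q, vis)).1) := by
  intro ys
  induction ys with
  | nil =>
    intro _ q vis hlen
    refine ⟨hlen, mono_refl vis, fun j _ _ h => Or.inl h, by simp, fun j h => Or.inl h,
      fun j h => h, ?_⟩
    intro j _ _ hf ht
    simp only [List.foldl_nil] at ht
    rw [hf] at ht; exact absurd ht (by simp)
  | cons y ys ih =>
    intro hys q vis hlen
    have hy := hys y (by simp)
    simp only [List.foldl_cons]
    by_cases hv : pvGet vis y = false
    · have hstep : pushF (q, vis) y = (q ++ [y], pvSet vis y) := by simp [pushF, hv]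
      rw [hstep]
      have hlen1 : (pvSet vis y).length = n := by rw [length_pvSet]; exact hlen
      have hget1 : ∀ j : Int, 0 ≤ j → j < (n : Int) →
          pvGet (pvSet vis y) j = if j = y then true else pvGet vis j := by
        intro j hj0 hj1
        exact pvGet_set hy.1 (by omega) hj0 (by omega)
      obtain ⟨L1, L2, L3, L4, L5, L6, L7⟩ :=
        ih (fun z hz => hys z (by simp [hz])) (q ++ [y]) (pvSet vis y) hlen1
      refine ⟨L1, mono_trans (mono_pvSet vis y hy.1) L2, ?_, ?_, ?_, ?_, ?_⟩
      · intro j hj0 hj1 h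
        rcases L3 j hj0 hj1 h with h1 | h1
        · rw [hget1 j hj0 hj1] at h1
          by_cases hjy : j = y
          · exact Or.inr (by simp [hjy])
          · rw [if_neg hjy] at h1; exact Or.inl h1
        · exact Or.inr (by simp [h1])
      · intro z hz
        rcases List.mem_cons.1 hz with rfl | hz'
        · refine mono_pvGet L2 hy.1 (by rw [hlen1]; exact hy.2) ?_
          rw [hget1 z hy.1 hy.2, if_pos rfl]
        · exact L4 z hz'
      · intro j hj
        rcases L5 j hj with h1 | ⟨hj0, hj1, hjf, hjt⟩
        · rcases List.mem_append.1 h1 with h2 | h2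
          · exact Or.inl h2
          · have hjy : j = y := by simpa using h2
            subst hjy
            refine Or.inr ⟨hy.1, hy.2, hv, ?_⟩
            refine mono_pvGet L2 hy.1 (by rw [hlen1]; exact hy.2) ?_
            rw [hget1 j hy.1 hy.2, if_pos rfl]
        · rw [hget1 j hj0 hj1] at hjf
          by_cases hjy : j = y
          · rw [if_pos hjy] at hjf; exact absurd hjf (by simp)
          · rw [if_neg hjy] at hjf
            exact Or.inr ⟨hj0, hj1, hjf, hjt⟩
      · intro j hj
        exact L6 j (by simp [hj])
      · intro j hj0 hj1 hjf hjt
        by_cases hjy : j = y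
        · exact L6 j (by simp [hjy])
        · refine L7 j hj0 hj1 ?_ hjt
          rw [hget1 j hj0 hj1, if_neg hjy]; exact hjf
    · have hvt : pvGet vis y = true := by revert hv; cases pvGet vis y <;> simp
      have hstep : pushF (q, vis) y = (q, vis) := by simp [pushF, hvt]
      rw [hstep]
      obtain ⟨L1, L2, L3, L4, L5, L6, L7⟩ :=
        ih (fun z hz => hys z (by simp [hz])) q vis hlen
      refine ⟨L1, L2, ?_, ?_, L5, L6, L7⟩
      · intro j hj0 hj1 h
        rcases L3 j hj0 hj1 h with h1 | h1
        · exact Or.inl h1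
        · exact Or.inr (by simp [h1])
      · intro z hz
        rcases List.mem_cons.1 hz with rfl | hz'
        · exact mono_pvGet L2 hy.1 (by rw [hlen]; exact hy.2) hvt
        · exact L4 z hz'

-- the frontier fold (one whole BFS level)
theorem lfold (adj : List (List Int)) (n : Nat) (hg : Good adj n) :
    ∀ (l : List Int), (∀ u ∈ l, 0 ≤ u ∧ u < (n : Int)) →
    ∀ (q : List Int) (vis : List Bool), vis.length = n →
      ((l.foldl (bfsStep adj) (q, vis)).2.length = n) ∧
      Mono vis (l.foldl (bfsStep adj) (q, vis)).2 ∧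
      (∀ j : Int, 0 ≤ j → j < (n : Int) → pvGet (l.foldl (bfsStep adj) (q, vis)).2 j = true →
        pvGet vis j = true ∨ ∃ u ∈ l, j ∈ pvNbr adj u) ∧
      (∀ u ∈ l, ∀ y ∈ pvNbr adj u, pvGet (l.foldl (bfsStep adj) (q, vis)).2 y = true) ∧
      (∀ j, j ∈ (l.foldl (bfsStep adj) (q, vis)).1 →
        j ∈ q ∨ (0 ≤ j ∧ j < (n : Int) ∧ pvGet vis j = false ∧
          pvGet (l.foldl (bfsStep adj) (q, vis)).2 j = true)) ∧
      (∀ j ∈ q, j ∈ (l.foldl (bfsStep adj) (q, vis)).1) ∧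
      (∀ j : Int, 0 ≤ j → j < (n : Int) → pvGet vis j = false →
        pvGet (l.foldl (bfsStep adj) (q, vis)).2 j = true →
        j ∈ (l.foldl (bfsStep adj) (q, vis)).1) := by
  intro l
  induction l with
  | nil =>
    intro _ q vis hlen
    refine ⟨hlen, mono_refl vis, fun j _ _ h => Or.inl h, by simp, fun j h => Or.inl h,
      fun j h => h, ?_⟩
    intro j _ _ hf ht
    simp only [List.foldl_nil] at ht
    rw [hf] at ht; exact absurd ht (by simp)
  | cons u l ih =>
    intro hl q vis hlen
    have hu := hl u (by simp)
    have hys := hg u hu.1 hu.2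
    simp only [List.foldl_cons]
    have hstep : bfsStep adj (q, vis) u = (pvNbr adj u).foldl pushF (q, vis) := rfl
    rw [hstep]
    obtain ⟨N1, N2, N3, N4, N5, N6, N7⟩ := nfold n (pvNbr adj u) hys q vis hlen
    set p := (pvNbr adj u).foldl pushF (q, vis) with hp
    have hpe : (p.1, p.2) = p := rfl
    obtain ⟨I1, I2, I3, I4, I5, I6, I7⟩ :=
      ih (fun z hz => hl z (by simp [hz])) p.1 p.2 N1
    rw [hpe] at I1 I2 I3 I4 I5 I6 I7
    refine ⟨I1, mono_trans N2 I2, ?_, ?_, ?_, ?_, ?_⟩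
    · intro j hj0 hj1 h
      rcases I3 j hj0 hj1 h with h1 | ⟨w, hw, hwe⟩
      · rcases N3 j hj0 hj1 h1 with h2 | h2
        · exact Or.inl h2
        · exact Or.inr ⟨u, by simp, h2⟩
      · exact Or.inr ⟨w, by simp [hw], hwe⟩
    · intro w hw y hy
      rcases List.mem_cons.1 hw with rfl | hw'
      · have hyr := hg w hu.1 hu.2 y hy
        exact mono_pvGet I2 hyr.1 (by rw [N1]; exact hyr.2) (N4 y hy)
      · exact I4 w hw' y hy
    · intro j hj
      rcases I5 j hj with h1 | ⟨hj0, hj1, hjf, hjt⟩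
      · rcases N5 j h1 with h2 | ⟨hj0, hj1, hjf, hjt⟩
        · exact Or.inl h2
        · exact Or.inr ⟨hj0, hj1, hjf, mono_pvGet I2 hj0 (by rw [N1]; exact hj1) hjt⟩
      · have hvisf : pvGet vis j = false := by
          by_cases hvj : pvGet vis j = true
          · have := mono_pvGet N2 hj0 (by rw [hlen]; exact hj1) hvj
            rw [this] at hjf; exact absurd hjf (by simp)
          · revert hvj; cases pvGet vis j <;> simp
        exact Or.inr ⟨hj0, hj1, hvisf, hjt⟩
    · intro j hj
      exact I6 j (N6 j hj)
    · intro j hj0 hj1 hjf hjt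
      by_cases hpj : pvGet p.2 j = true
      · exact I6 j (N7 j hj0 hj1 hjf hpj)
      · have hpjf : pvGet p.2 j = false := by revert hpj; cases pvGet p.2 j <;> simp
        exact I7 j hj0 hj1 hpjf hjt

-- length preservation (no range hypotheses needed)
theorem pushF_len : ∀ (ys : List Int) (p : List Int × List Bool),
    ((ys.foldl pushF p).2).length = p.2.length := by
  intro ys
  induction ys with
  | nil => intro p; rfl
  | cons y ys ih =>
    intro p
    simp only [List.foldl_cons]
    rw [ih (pushF p y)]
    unfold pushF
    split
    · simp [length_pvSet]
    · rfl

theorem stepfold_len (adj : List (List Int)) : ∀ (l : List Int) (p : List Int × List Bool),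
    ((l.foldl (bfsStep adj) p).2).length = p.2.length := by
  intro l
  induction l with
  | nil => intro p; rfl
  | cons u l ih =>
    intro p
    simp only [List.foldl_cons]
    rw [ih (bfsStep adj p u)]
    exact pushF_len (pvNbr adj u) p

theorem bfsLoop_len (adj : List (List Int)) : ∀ (fuel : Nat) (fr : List Int) (vis : List Bool),
    (bfsLoop adj fuel fr vis).length = vis.length := by
  intro fuel
  induction fuel with
  | zero => intro fr vis; rfl
  | succ fuel ih =>
    intro fr vis
    match fr with
    | [] => rfl
    | u :: rest =>
      simp only [bfsLoop]
      rw [ih]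
      exact stepfold_len adj (u :: rest) ([], vis)

theorem bfsLoop_mono (adj : List (List Int)) (n : Nat) (hg : Good adj n) :
    ∀ (fuel : Nat) (fr : List Int) (vis : List Bool),
      (∀ s ∈ fr, 0 ≤ s ∧ s < (n : Int)) → vis.length = n →
      Mono vis (bfsLoop adj fuel fr vis) := by
  intro fuel
  induction fuel with
  | zero => intro fr vis _ _; exact mono_refl vis
  | succ fuel ih =>
    intro fr vis hfr hlen
    match fr with
    | [] => exact mono_refl vis
    | u :: rest =>
      simp only [bfsLoop]
      obtain ⟨L1, L2, _, _, L5, _, _⟩ := lfold adj n hg (u :: rest) hfr [] vis hlen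
      have hfr' : ∀ s ∈ ((u :: rest).foldl (bfsStep adj) ([], vis)).1,
          0 ≤ s ∧ s < (n : Int) := by
        intro s hs
        rcases L5 s hs with h | ⟨h0, h1, _, _⟩
        · exact absurd h (by simp)
        · exact ⟨h0, h1⟩
      exact mono_trans L2 (ih _ _ hfr' L1)

theorem bfsLoop_upper (adj : List (List Int)) (n : Nat) (hg : Good adj n) :
    ∀ (fuel : Nat) (fr : List Int) (vis : List Bool),
      (∀ s ∈ fr, 0 ≤ s ∧ s < (n : Int)) → vis.length = n →
      ∀ j : Int, 0 ≤ j → j < (n : Int) →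
        pvGet (bfsLoop adj fuel fr vis) j = true →
        pvGet vis j = true ∨ ∃ s ∈ fr, Reach adj s j := by
  intro fuel
  induction fuel with
  | zero => intro fr vis _ _ j _ _ h; exact Or.inl h
  | succ fuel ih =>
    intro fr vis hfr hlen j hj0 hj1 h
    match fr with
    | [] => exact Or.inl (by simpa [bfsLoop] using h)
    | u :: rest =>
      simp only [bfsLoop] at h
      obtain ⟨L1, L2, L3, _, L5, _, _⟩ := lfold adj n hg (u :: rest) hfr [] vis hlen
      have hfr' : ∀ s ∈ ((u :: rest).foldl (bfsStep adj) ([], vis)).1,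
          0 ≤ s ∧ s < (n : Int) := by
        intro s hs
        rcases L5 s hs with h' | ⟨h0, h1, _, _⟩
        · exact absurd h' (by simp)
        · exact ⟨h0, h1⟩
      rcases ih _ _ hfr' L1 j hj0 hj1 h with h1 | ⟨s, hs, hr⟩
      · rcases L3 j hj0 hj1 h1 with h2 | ⟨w, hw, hwe⟩
        · exact Or.inl h2
        · exact Or.inr ⟨w, hw, Relation.ReflTransGen.single hwe⟩
      · rcases L5 s hs with h' | ⟨hs0, hs1, hsf, hst⟩
        · exact absurd h' (by simp)
        · rcases L3 s hs0 hs1 hst with h2 | ⟨w, hw, hwe⟩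
          · rw [h2] at hsf; exact absurd hsf (by simp)
          · exact Or.inr ⟨w, hw,
              Relation.ReflTransGen.trans (Relation.ReflTransGen.single hwe) hr⟩

theorem bfsLoop_lower (adj : List (List Int)) (n : Nat) (hg : Good adj n) :
    ∀ (fuel : Nat) (fr : List Int) (vis : List Bool), vis.length = n →
      (∀ s ∈ fr, 0 ≤ s ∧ s < (n : Int)) →
      (∀ s ∈ fr, pvGet vis s = true) →
      (∀ u : Int, 0 ≤ u → u < (n : Int) → pvGet vis u = true →
        ∀ y ∈ pvNbr adj u, pvGet vis y = true ∨ u ∈ fr) →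
      vis.count false + 2 ≤ fuel →
      Closed adj n (bfsLoop adj fuel fr vis) := by
  intro fuel
  induction fuel with
  | zero => intro fr vis _ _ _ _ hf; omega
  | succ fuel ih =>
    intro fr vis hlen hfr hmk hcl hf
    match fr with
    | [] =>
      intro u hu0 hu1 hu y hy
      rcases hcl u hu0 hu1 hu y hy with h | h
      · exact h
      · exact absurd h (by simp)
    | u :: rest =>
      simp only [bfsLoop]
      obtain ⟨L1, L2, L3, L4, L5, L6, L7⟩ := lfold adj n hg (u :: rest) hfr [] vis hlen
      set p := ((u :: rest).foldl (bfsStep adj) ([], vis)) with hp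
      have hfr' : ∀ s ∈ p.1, 0 ≤ s ∧ s < (n : Int) := by
        intro s hs
        rcases L5 s hs with h | ⟨h0, h1, _, _⟩
        · exact absurd h (by simp)
        · exact ⟨h0, h1⟩
      have hmk' : ∀ s ∈ p.1, pvGet p.2 s = true := by
        intro s hs
        rcases L5 s hs with h | ⟨_, _, _, ht⟩
        · exact absurd h (by simp)
        · exact ht
      have hcl' : ∀ w : Int, 0 ≤ w → w < (n : Int) → pvGet p.2 w = true →
          ∀ y ∈ pvNbr adj w, pvGet p.2 y = true ∨ w ∈ p.1 := by
        intro w hw0 hw1 hw y hy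
        by_cases hvw : pvGet vis w = true
        · rcases hcl w hw0 hw1 hvw y hy with h | h
          · have hyr := hg w hw0 hw1 y hy
            exact Or.inl (mono_pvGet L2 hyr.1 (by rw [hlen]; exact hyr.2) h)
          · exact Or.inl (L4 w h y hy)
        · have hvwf : pvGet vis w = false := by revert hvw; cases pvGet vis w <;> simp
          exact Or.inr (L7 w hw0 hw1 hvwf hw)
      by_cases hemp : p.1 = []
      · rw [hemp]
        rw [show bfsLoop adj fuel [] p.2 = p.2 from by cases fuel <;> rfl]
        intro w hw0 hw1 hw y hy
        rcases hcl' w hw0 hw1 hw y hy with h | h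
        · exact h
        · rw [hemp] at h; exact absurd h (by simp)
      · obtain ⟨j, hj⟩ := List.exists_mem_of_ne_nil p.1 hemp
        rcases L5 j hj with h | ⟨hj0, hj1, hjf, hjt⟩
        · exact absurd h (by simp)
        · have hstrict : p.2.count false < vis.count false := by
            have hja : vis[j.toNat]'(by omega) = false := by
              rw [← pvGet_eq hj0 (by omega)]; exact hjf
            have hjb : p.2[j.toNat]'(by rw [← mono_length L2]; omega) = true := by
              rw [← pvGet_eq hj0 (by rw [L1]; omega)]; exact hjt
            exact cf_strict L2 (by omega) hja hjb
          exact ih p.1 p.2 L1 hfr' hmk' hcl' (by omega)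

theorem bfs_char (adj : List (List Int)) (n : Nat) (hg : Good adj n)
    (i : Int) (vis : List Bool) (hlen : vis.length = n) (hi0 : 0 ≤ i) (hi1 : i < (n : Int))
    (hcl : Closed adj n vis) {fb : Nat} (hfb : vis.count false + 2 ≤ fb) :
    (bfsB adj fb i vis).length = n ∧
    ∀ j : Int, 0 ≤ j → j < (n : Int) →
      (pvGet (bfsB adj fb i vis) j = true ↔ pvGet vis j = true ∨ Reach adj i j) := by
  unfold bfsB
  have hlen0 : (pvSet vis i).length = n := by rw [length_pvSet]; exact hlen
  have hget0 : ∀ j : Int, 0 ≤ j → j < (n : Int) →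
      pvGet (pvSet vis i) j = if j = i then true else pvGet vis j := by
    intro j hj0 hj1
    exact pvGet_set hi0 (by omega) hj0 (by omega)
  have hfr : ∀ s ∈ [i], 0 ≤ s ∧ s < (n : Int) := by
    intro s hs; rcases List.mem_singleton.1 hs with rfl; exact ⟨hi0, hi1⟩
  have hmk : ∀ s ∈ [i], pvGet (pvSet vis i) s = true := by
    intro s hs; rcases List.mem_singleton.1 hs with rfl
    rw [hget0 s hi0 hi1, if_pos rfl]
  have hcl0 : ∀ u : Int, 0 ≤ u → u < (n : Int) → pvGet (pvSet vis i) u = true →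
      ∀ y ∈ pvNbr adj u, pvGet (pvSet vis i) y = true ∨ u ∈ [i] := by
    intro u hu0 hu1 hu y hy
    by_cases hui : u = i
    · exact Or.inr (by simp [hui])
    · rw [hget0 u hu0 hu1, if_neg hui] at hu
      have hyr := hg u hu0 hu1 y hy
      refine Or.inl ?_
      rw [hget0 y hyr.1 hyr.2]
      by_cases hyi : y = i
      · rw [if_pos hyi]
      · rw [if_neg hyi]; exact hcl u hu0 hu1 hu y hy
  have hcf0 : (pvSet vis i).count false ≤ vis.count false := cf_mono (mono_pvSet vis i hi0)
  have hmono := bfsLoop_mono adj n hg fb [i] (pvSet vis i) hfr hlen0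
  have hlen2 : (bfsLoop adj fb [i] (pvSet vis i)).length = n := by
    rw [bfsLoop_len]; exact hlen0
  have hloCl := bfsLoop_lower adj n hg fb [i] (pvSet vis i) hlen0 hfr hmk hcl0 (by omega)
  have hri : pvGet (bfsLoop adj fb [i] (pvSet vis i)) i = true :=
    mono_pvGet hmono hi0 (by rw [hlen0]; exact hi1) (hmk i (by simp))
  refine ⟨hlen2, ?_⟩
  intro j hj0 hj1
  constructor
  · intro h
    rcases bfsLoop_upper adj n hg fb [i] (pvSet vis i) hfr hlen0 j hj0 hj1 h with h1 | ⟨s, hs, hr⟩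
    · rw [hget0 j hj0 hj1] at h1
      by_cases hji : j = i
      · exact Or.inr (hji ▸ Relation.ReflTransGen.refl)
      · rw [if_neg hji] at h1; exact Or.inl h1
    · rcases List.mem_singleton.1 hs with rfl
      exact Or.inr hr
  · rintro (h | h)
    · refine mono_pvGet hmono hj0 (by rw [hlen0]; exact hj1) ?_
      rw [hget0 j hj0 hj1]
      by_cases hji : j = i
      · rw [if_pos hji]
      · rw [if_neg hji]; exact h
    · exact (reach_marked adj n hg _ hloCl hi0 hi1 hri h).2

theorem pvGet_natCast (c : List Bool) (k : Nat) : pvGet c (k : Int) = c.getD k true :=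
  PySem.List.pyGetD_natCast c k true

-- A's dfs and B's bfs mark the same list (both characterised by vis ∪ Reach i ·)
theorem dfs_eq (adj : List (List Int)) (n : Nat) (hg : Good adj n)
    (i : Int) (vis : List Bool) (hlen : vis.length = n) (hi0 : 0 ≤ i) (hi1 : i < (n : Int))
    (hvi : pvGet vis i = false) (hcl : Closed adj n vis)
    {fa fb : Nat} (hfa : vis.count false ≤ fa) (hfb : vis.count false + 2 ≤ fb) :
    dfsA adj fa i vis = bfsB adj fb i vis := by
  have hA := dfsA_char adj n hg i vis hlen hi0 hi1 hvi hcl hfa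
  have hB := bfs_char adj n hg i vis hlen hi0 hi1 hcl hfb
  apply List.ext_getElem (by rw [hA.1, hB.1])
  intro k h1 h2
  have hk0 : (0 : Int) ≤ (k : Int) := by positivity
  have hk1 : (k : Int) < (n : Int) := by rw [hA.1] at h1; exact_mod_cast h1
  have hiff := (hA.2 k hk0 hk1).trans (hB.2 k hk0 hk1).symm
  rw [pvGet_natCast _ k, pvGet_natCast _ k, List.getD_eq_getElem _ _ h1,
    List.getD_eq_getElem _ _ h2] at hiff
  exact Bool.eq_iff_iff.2 hiff

-- first pass: A's (vis, mother) fold and B's (mother, vis) fold stay in lockstep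
theorem phase_all (adj : List (List Int)) (n : Nat) (hg : Good adj n) (fa fb : Nat)
    (hfa : n ≤ fa) (hfb : n + 2 ≤ fb) :
    ∀ (l : List Int), (∀ x ∈ l, 0 ≤ x ∧ x < (n : Int)) →
      ∀ (vis : List Bool) (m : Int), vis.length = n → Closed adj n vis →
        0 ≤ m → m < (n : Int) →
        (l.foldl (fun (st : Int × List Bool) i =>
            if pvGet st.2 i = false then (i, bfsB adj fb i st.2) else st) (m, vis) =
          ((l.foldl (fun (st : List Bool × Int) i =>
            if pvGet st.1 i = false then (dfsA adj fa i st.1, i) else st) (vis, m)).2,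
           (l.foldl (fun (st : List Bool × Int) i =>
            if pvGet st.1 i = false then (dfsA adj fa i st.1, i) else st) (vis, m)).1)) ∧
        (l.foldl (fun (st : List Bool × Int) i =>
            if pvGet st.1 i = false then (dfsA adj fa i st.1, i) else st) (vis, m)).1.length = n ∧
        Closed adj n (l.foldl (fun (st : List Bool × Int) i =>
            if pvGet st.1 i = false then (dfsA adj fa i st.1, i) else st) (vis, m)).1 ∧
        0 ≤ (l.foldl (fun (st : List Bool × Int) i =>
            if pvGet st.1 i = false then (dfsA adj fa i st.1, i) else st) (vis, m)).2 ∧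
        (l.foldl (fun (st : List Bool × Int) i =>
            if pvGet st.1 i = false then (dfsA adj fa i st.1, i) else st) (vis, m)).2 < (n : Int) := by
  intro l
  induction l with
  | nil =>
    intro _ vis m hlen hcl hm0 hm1
    exact ⟨rfl, hlen, hcl, hm0, hm1⟩
  | cons x l ih =>
    intro hl vis m hlen hcl hm0 hm1
    have hx := hl x (by simp)
    simp only [List.foldl_cons]
    by_cases hvx : pvGet vis x = false
    · rw [if_pos hvx, if_pos hvx]
      have hcf : vis.count false ≤ n := by
        rw [← hlen]; exact List.count_le_length
      have heq := dfs_eq adj n hg x vis hlen hx.1 hx.2 hvx hcl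
        (fa := fa) (fb := fb) (by omega) (by omega)
      have hchar := dfsA_char adj n hg x vis hlen hx.1 hx.2 hvx hcl
        (by omega : vis.count false ≤ fa)
      have hcl1 : Closed adj n (dfsA adj fa x vis) := by
        intro u hu0 hu1 hu y hy
        have hyr := hg u hu0 hu1 y hy
        rw [hchar.2 u hu0 hu1] at hu
        rw [hchar.2 y hyr.1 hyr.2]
        rcases hu with h | h
        · exact Or.inl (hcl u hu0 hu1 h y hy)
        · exact Or.inr (Relation.ReflTransGen.tail h hy)
      rw [← heq]
      exact ih (fun z hz => hl z (by simp [hz])) (dfsA adj fa x vis) x hchar.1 hcl1 hx.1 hx.2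
    · rw [if_neg hvx, if_neg hvx]
      exact ih (fun z hz => hl z (by simp [hz])) vis m hlen hcl hm0 hm1

theorem contains_false_eq (l : List Bool) : l.contains false = !(l.all (fun b => b)) := by
  induction l with
  | nil => simp
  | cons x xs ih => cases x <;> simp_all

-- ===== negative-alias normalisation (len(adj) = V): label y < 0 behaves as vertex V+y =====

def normI (V y : Int) : Int := if y < 0 then y + V else y

def Lab (V : Int) (len : Nat) (y : Int) : Prop :=
  (0 ≤ y ∧ y < V) ∨ (-V ≤ y ∧ y < 0 ∧ (len : Int) = V)

theorem pyIdx_wrap (n : Nat) {y : Int} (h0 : -(n : Int) ≤ y) (h1 : y < 0) :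
    PySem.List.pyIdx? n y = PySem.List.pyIdx? n (y + (n : Int)) := by
  unfold PySem.List.pyIdx?
  have h2 : ¬ (0 ≤ y) := by omega
  have h3 : 0 ≤ y + (n : Int) := by omega
  have h4 : y + (n : Int) < (n : Int) := by omega
  have h5 : n - (-y).toNat = (y + (n : Int)).toNat := by omega
  simp [h2, h3, h4, h0, h5]

theorem pvGet_wrap (vis : List Bool) {y : Int} (h0 : -(vis.length : Int) ≤ y) (h1 : y < 0) :
    pvGet vis y = pvGet vis (y + (vis.length : Int)) := by
  unfold pvGet PySem.List.pyGetD PySem.List.pyGet?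
  rw [pyIdx_wrap vis.length h0 h1]

theorem pvSet_wrap (vis : List Bool) {y : Int} (h0 : -(vis.length : Int) ≤ y) (h1 : y < 0) :
    pvSet vis y = pvSet vis (y + (vis.length : Int)) := by
  unfold pvSet PySem.List.pySetD PySem.List.pySet?
  rw [pyIdx_wrap vis.length h0 h1]

theorem pvNbr_wrap (adj : List (List Int)) {y : Int} (h0 : -(adj.length : Int) ≤ y)
    (h1 : y < 0) : pvNbr adj y = pvNbr adj (y + (adj.length : Int)) := by
  unfold pvNbr PySem.List.pyGetD PySem.List.pyGet?
  rw [pyIdx_wrap adj.length h0 h1]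

theorem lab_norm_range {V : Int} {L : Nat} {y : Int} (_hV : 1 ≤ V) (hy : Lab V L y) :
    0 ≤ normI V y ∧ normI V y < V := by
  unfold normI
  rcases hy with ⟨h1, h2⟩ | ⟨h1, h2, _⟩ <;> split <;> omega

theorem normGet (V : Int) {L : Nat} (vis : List Bool) (hn : (vis.length : Int) = V)
    {y : Int} (hy : Lab V L y) : pvGet vis y = pvGet vis (normI V y) := by
  rcases hy with ⟨h1, _⟩ | ⟨h1, h2, _⟩
  · rw [show normI V y = y from if_neg (by omega)]
  · rw [pvGet_wrap vis (by omega) h2]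
    congr 1
    unfold normI
    rw [if_pos h2]
    omega

theorem normSet (V : Int) {L : Nat} (vis : List Bool) (hn : (vis.length : Int) = V)
    {y : Int} (hy : Lab V L y) : pvSet vis y = pvSet vis (normI V y) := by
  rcases hy with ⟨h1, _⟩ | ⟨h1, h2, _⟩
  · rw [show normI V y = y from if_neg (by omega)]
  · rw [pvSet_wrap vis (by omega) h2]
    congr 1
    unfold normI
    rw [if_pos h2]
    omega

theorem normNbr (V : Int) (adj : List (List Int)) {y : Int} (hy : Lab V adj.length y) :
    pvNbr adj y = pvNbr adj (normI V y) := by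
  rcases hy with ⟨h1, _⟩ | ⟨h1, h2, hL⟩
  · rw [show normI V y = y from if_neg (by omega)]
  · rw [pvNbr_wrap adj (by omega) h2]
    congr 1
    unfold normI
    rw [if_pos h2]
    omega

theorem labNbr (V : Int) (adj : List (List Int)) (hV : 1 ≤ V)
    (hVlen : V ≤ (adj.length : Int))
    (HL : ∀ row ∈ adj.take V.toNat, ∀ y ∈ row, Lab V adj.length y)
    {u : Int} (hu : Lab V adj.length u) :
    ∀ z ∈ pvNbr adj u, Lab V adj.length z := by
  intro z hz
  have hr := lab_norm_range hV hu
  rw [normNbr V adj hu] at hz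
  have hlt : (normI V u).toNat < (adj.take V.toNat).length := by
    simp [List.length_take]; omega
  have hrow : pvNbr adj (normI V u) = adj[(normI V u).toNat]'(by omega) := by
    unfold pvNbr
    rw [PySem.List.pyGetD_eq_getElem adj [] hr.1 (by omega)]
  have hmem : adj[(normI V u).toNat]'(by omega) ∈ adj.take V.toNat := by
    rw [← List.getElem_take (j := V.toNat) (i := (normI V u).toNat) (h := hlt)]
    exact List.getElem_mem hlt
  rw [hrow] at hz
  exact HL _ hmem z hz

theorem nbrN (V : Int) (adj : List (List Int)) (hV : 1 ≤ V)
    (hVlen : V ≤ (adj.length : Int)) {u : Int} (hu : Lab V adj.length u) :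
    pvNbr (adj.map (List.map (normI V))) (normI V u) = (pvNbr adj u).map (normI V) := by
  have hr := lab_norm_range hV hu
  have hlen : ((adj.map (List.map (normI V))).length : Int) = (adj.length : Int) := by simp
  unfold pvNbr
  rw [PySem.List.pyGetD_eq_getElem _ [] hr.1 (by rw [hlen]; omega)]
  rw [show PySem.List.pyGetD adj u [] = pvNbr adj u from rfl, normNbr V adj hu]
  unfold pvNbr
  rw [PySem.List.pyGetD_eq_getElem adj [] hr.1 (by omega)]
  simp

theorem dfsA_length (adj : List (List Int)) :
    ∀ (fuel : Nat) (i : Int) (vis : List Bool), (dfsA adj fuel i vis).length = vis.length := by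
  intro fuel
  induction fuel with
  | zero => intro i vis; rfl
  | succ fuel ih =>
    intro i vis
    simp only [dfsA]
    have aux : ∀ (l : List Int) (c : List Bool), c.length = vis.length →
        (l.foldl (fun c y => if pvGet c y = false then dfsA adj fuel y c else c) c).length =
          vis.length := by
      intro l
      induction l with
      | nil => intro c hc; exact hc
      | cons y l ihl =>
        intro c hc
        simp only [List.foldl_cons]
        by_cases h : pvGet c y = false
        · rw [if_pos h]; exact ihl _ (by rw [ih y c]; exact hc)
        · rw [if_neg h]; exact ihl c hc
    exact aux _ _ (by rw [length_pvSet])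

theorem normA (V : Int) (adj : List (List Int)) (hV : 1 ≤ V) (hVlen : V ≤ (adj.length : Int))
    (HL : ∀ row ∈ adj.take V.toNat, ∀ y ∈ row, Lab V adj.length y) :
    ∀ (fuel : Nat) (y : Int) (vis : List Bool), Lab V adj.length y →
      (vis.length : Int) = V →
      dfsA adj fuel y vis = dfsA (adj.map (List.map (normI V))) fuel (normI V y) vis := by
  intro fuel
  induction fuel with
  | zero => intro y vis _ _; rfl
  | succ fuel ih =>
    intro y vis hy hn
    simp only [dfsA]
    rw [nbrN V adj hV hVlen hy, ← normSet V vis hn hy, List.foldl_map]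
    have aux : ∀ (l : List Int), (∀ z ∈ l, Lab V adj.length z) →
        ∀ (c : List Bool), (c.length : Int) = V →
        l.foldl (fun c y => if pvGet c y = false then dfsA adj fuel y c else c) c =
        l.foldl (fun c z =>
          if pvGet c (normI V z) = false
          then dfsA (adj.map (List.map (normI V))) fuel (normI V z) c else c) c := by
      intro l
      induction l with
      | nil => intro _ c _; rfl
      | cons z l ihl =>
        intro hl c hc
        have hz := hl z (by simp)
        simp only [List.foldl_cons]
        rw [← normGet V c hc hz]
        by_cases h : pvGet c z = false
        · rw [if_pos h, if_pos h, ← ih z c hz hc]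
          exact ihl (fun w hw => hl w (by simp [hw])) _ (by rw [dfsA_length]; exact hc)
        · rw [if_neg h, if_neg h]
          exact ihl (fun w hw => hl w (by simp [hw])) c hc
    exact aux _ (labNbr V adj hV hVlen HL hy) _ (by rw [length_pvSet]; exact hn)

-- queue members come only from the initial queue or traversed rows
theorem push_mem : ∀ (ys : List Int) (p : List Int × List Bool) (j : Int),
    j ∈ (ys.foldl pushF p).1 → j ∈ p.1 ∨ j ∈ ys := by
  intro ys
  induction ys with
  | nil => intro p j h; exact Or.inl h
  | cons y ys ih =>
    intro p j h
    simp only [List.foldl_cons] at h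
    rcases ih (pushF p y) j h with h1 | h1
    · unfold pushF at h1
      split at h1
      · simp only at h1
        rcases List.mem_append.1 h1 with h2 | h2
        · exact Or.inl h2
        · have hje : j = y := by simpa using h2
          exact Or.inr (by simp [hje])
      · exact Or.inl h1
    · exact Or.inr (by simp [h1])

theorem step_mem (adj : List (List Int)) : ∀ (l : List Int) (p : List Int × List Bool) (j : Int),
    j ∈ (l.foldl (bfsStep adj) p).1 → j ∈ p.1 ∨ ∃ u ∈ l, j ∈ pvNbr adj u := by
  intro l
  induction l with
  | nil => intro p j h; exact Or.inl h
  | cons u l ih =>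
    intro p j h
    simp only [List.foldl_cons] at h
    rcases ih (bfsStep adj p u) j h with h1 | ⟨w, hw, hwe⟩
    · rcases push_mem (pvNbr adj u) p j h1 with h2 | h2
      · exact Or.inl h2
      · exact Or.inr ⟨u, by simp, h2⟩
    · exact Or.inr ⟨w, by simp [hw], hwe⟩

-- the pushF fold on a normalised row
theorem normPush (V : Int) (adj : List (List Int)) :
    ∀ (ys : List Int), (∀ z ∈ ys, Lab V adj.length z) →
    ∀ (q : List Int) (vis : List Bool), (vis.length : Int) = V →
      (ys.map (normI V)).foldl pushF (q.map (normI V), vis) =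
        (((ys.foldl pushF (q, vis)).1).map (normI V), (ys.foldl pushF (q, vis)).2) := by
  intro ys
  induction ys with
  | nil => intro _ q vis _; rfl
  | cons z ys ih =>
    intro hl q vis hn
    have hz := hl z (by simp)
    simp only [List.map_cons, List.foldl_cons]
    by_cases h : pvGet vis z = false
    · have h' : pvGet vis (normI V z) = false := by rw [← normGet V vis hn hz]; exact h
      have e1 : pushF (q.map (normI V), vis) (normI V z) =
          ((q ++ [z]).map (normI V), pvSet vis z) := by
        simp [pushF, h', ← normSet V vis hn hz]
      have e2 : pushF (q, vis) z = (q ++ [z], pvSet vis z) := by simp [pushF, h]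
      rw [e1, e2]
      exact ih (fun w hw => hl w (by simp [hw])) (q ++ [z]) (pvSet vis z)
        (by rw [length_pvSet]; exact hn)
    · have ht : pvGet vis z = true := by revert h; cases pvGet vis z <;> simp
      have ht' : pvGet vis (normI V z) = true := by rw [← normGet V vis hn hz]; exact ht
      have e1 : pushF (q.map (normI V), vis) (normI V z) = (q.map (normI V), vis) := by
        simp [pushF, ht']
      have e2 : pushF (q, vis) z = (q, vis) := by simp [pushF, ht]
      rw [e1, e2]
      exact ih (fun w hw => hl w (by simp [hw])) q vis hn

-- one whole BFS level on the normalised graph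
theorem normLevel (V : Int) (adj : List (List Int)) (hV : 1 ≤ V)
    (hVlen : V ≤ (adj.length : Int))
    (HL : ∀ row ∈ adj.take V.toNat, ∀ y ∈ row, Lab V adj.length y) :
    ∀ (l : List Int), (∀ u ∈ l, Lab V adj.length u) →
    ∀ (q : List Int) (vis : List Bool), (vis.length : Int) = V →
      (l.map (normI V)).foldl (bfsStep (adj.map (List.map (normI V)))) (q.map (normI V), vis) =
        (((l.foldl (bfsStep adj) (q, vis)).1).map (normI V),
         (l.foldl (bfsStep adj) (q, vis)).2) := by
  intro l
  induction l with
  | nil => intro _ q vis _; rfl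
  | cons u l ih =>
    intro hl q vis hn
    have hu := hl u (by simp)
    simp only [List.map_cons, List.foldl_cons]
    have e1 : bfsStep (adj.map (List.map (normI V))) (q.map (normI V), vis) (normI V u) =
        (((bfsStep adj (q, vis) u).1).map (normI V), (bfsStep adj (q, vis) u).2) := by
      unfold bfsStep
      rw [nbrN V adj hV hVlen hu]
      exact normPush V adj (pvNbr adj u) (labNbr V adj hV hVlen HL hu) q vis hn
    rw [e1]
    have hstate := ih (fun w hw => hl w (by simp [hw]))
      (bfsStep adj (q, vis) u).1 (bfsStep adj (q, vis) u).2
      (by rw [show (bfsStep adj (q, vis) u).2.length = vis.length from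
        pushF_len (pvNbr adj u) (q, vis)]; exact hn)
    rw [show ((bfsStep adj (q, vis) u).1, (bfsStep adj (q, vis) u).2) =
      bfsStep adj (q, vis) u from rfl] at hstate
    exact hstate

theorem normLoop (V : Int) (adj : List (List Int)) (hV : 1 ≤ V)
    (hVlen : V ≤ (adj.length : Int))
    (HL : ∀ row ∈ adj.take V.toNat, ∀ y ∈ row, Lab V adj.length y) :
    ∀ (fuel : Nat) (fr : List Int) (vis : List Bool), (∀ s ∈ fr, Lab V adj.length s) →
      (vis.length : Int) = V →
      bfsLoop adj fuel fr vis =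
        bfsLoop (adj.map (List.map (normI V))) fuel (fr.map (normI V)) vis := by
  intro fuel
  induction fuel with
  | zero => intro fr vis _ _; rfl
  | succ fuel ih =>
    intro fr vis hfr hn
    match fr with
    | [] => rfl
    | u :: rest =>
      simp only [bfsLoop, List.map_cons]
      have hlevel := normLevel V adj hV hVlen HL (u :: rest) hfr [] vis hn
      simp only [List.map_cons, List.map_nil] at hlevel
      rw [show ([] : List Int) = ([].map (normI V)) from rfl] at hlevel
      simp only [List.map_nil] at hlevel
      rw [hlevel]
      have hfr' : ∀ s ∈ ((u :: rest).foldl (bfsStep adj) ([], vis)).1, Lab V adj.length s := by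
        intro s hs
        rcases step_mem adj (u :: rest) ([], vis) s hs with h | ⟨w, hw, hwe⟩
        · exact absurd h (by simp)
        · exact labNbr V adj hV hVlen HL (hfr w hw) s hwe
      exact ih _ _ hfr' (by rw [stepfold_len]; exact hn)

theorem normB (V : Int) (adj : List (List Int)) (hV : 1 ≤ V) (hVlen : V ≤ (adj.length : Int))
    (HL : ∀ row ∈ adj.take V.toNat, ∀ y ∈ row, Lab V adj.length y)
    (fuel : Nat) (y : Int) (vis : List Bool) (hy : Lab V adj.length y)
    (hn : (vis.length : Int) = V) :
    bfsB adj fuel y vis = bfsB (adj.map (List.map (normI V))) fuel (normI V y) vis := by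
  unfold bfsB
  rw [normSet V vis hn hy]
  have := normLoop V adj hV hVlen HL fuel [y] (pvSet vis (normI V y))
    (by intro s hs; rcases List.mem_singleton.1 hs with rfl; exact hy)
    (by rw [length_pvSet]; exact hn)
  simpa using this

-- A = B for graphs whose neighbour entries are genuine vertex numbers in [0,V)
theorem main_eq (V : Int) (adj : List (List Int)) (hV : 1 ≤ V) (hVlen : V ≤ (adj.length : Int))
    (hrows : ∀ row ∈ adj.take V.toNat, ∀ y ∈ row, 0 ≤ y ∧ y < V) :
    findMotherVertex V adj = findMotherVertex_alt V adj := by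
  have hVn : ((V.toNat : Nat) : Int) = V := by omega
  have hg : Good adj V.toNat := by
    intro u hu0 hu1 y hy
    have hua : u < (adj.length : Int) := by omega
    have htoNat : u.toNat < V.toNat := by omega
    have hlt : u.toNat < (adj.take V.toNat).length := by
      simp [List.length_take]; omega
    have hnb : pvNbr adj u = adj[u.toNat]'(by omega) := by
      unfold pvNbr; rw [PySem.List.pyGetD_eq_getElem adj [] hu0 hua]
    have hmem : adj[u.toNat]'(by omega) ∈ adj.take V.toNat := by
      rw [← List.getElem_take (j := V.toNat) (i := u.toNat) (h := hlt)]
      exact List.getElem_mem hlt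
    have hb := hrows _ hmem y (by rw [← hnb]; exact hy)
    exact ⟨hb.1, by rw [hVn]; exact hb.2⟩
  simp only [findMotherVertex, findMotherVertex_alt]
  have hl : ∀ x ∈ PySem.List.pyRange 0 V 1, 0 ≤ x ∧ x < ((V.toNat : Nat) : Int) := by
    intro x hx
    have := PySem.List.mem_pyRange_one.1 hx
    exact ⟨this.1, by rw [hVn]; exact this.2⟩
  have hlen0 : (List.replicate V.toNat false).length = V.toNat := by simp
  have hcl0 : Closed adj V.toNat (List.replicate V.toNat false) := by
    intro u hu0 hu1 hu y hy
    exfalso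
    rw [pvGet_eq hu0 (by rw [hlen0]; exact hu1)] at hu
    simp at hu
  obtain ⟨heqf, hlen1, hcl1, hmm0, hmm1⟩ :=
    phase_all adj V.toNat hg (V.toNat + 1) (V.toNat + 2) (by omega) (by omega)
      (PySem.List.pyRange 0 V 1) hl (List.replicate V.toNat false) 0 hlen0 hcl0
      (by omega) (by omega)
  rw [heqf]
  have hcf0 : (List.replicate V.toNat false).count false = V.toNat := by simp
  have hfresh : pvGet (List.replicate V.toNat false)
      ((PySem.List.pyRange 0 V 1).foldl (fun (st : List Bool × Int) i =>
        if pvGet st.1 i = false then (dfsA adj (V.toNat + 1) i st.1, i) else st)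
        (List.replicate V.toNat false, 0)).2 = false := by
    rw [pvGet_eq hmm0 (by rw [hlen0]; exact hmm1)]
    simp
  have heq2 := dfs_eq adj V.toNat hg _ (List.replicate V.toNat false) hlen0 hmm0 hmm1
    hfresh hcl0 (fa := V.toNat + 1) (by rw [hcf0]; omega)
    (fb := V.toNat + 2) (by rw [hcf0])
  rw [← heq2, contains_false_eq]
  by_cases h : (dfsA adj (V.toNat + 1)
      ((PySem.List.pyRange 0 V 1).foldl (fun (st : List Bool × Int) i =>
        if pvGet st.1 i = false then (dfsA adj (V.toNat + 1) i st.1, i) else st)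
        (List.replicate V.toNat false, 0)).2
      (List.replicate V.toNat false)).all (fun b => b) <;> simp [h]

theorem portA_norm (V : Int) (adj : List (List Int)) (hV : 1 ≤ V)
    (hVlen : V ≤ (adj.length : Int))
    (HL : ∀ row ∈ adj.take V.toNat, ∀ y ∈ row, Lab V adj.length y) :
    findMotherVertex V adj = findMotherVertex V (adj.map (List.map (normI V))) := by
  simp only [findMotherVertex]
  have hfold : ∀ (l : List Int), (∀ x ∈ l, 0 ≤ x ∧ x < V) → ∀ (st : List Bool × Int),
      (st.1.length : Int) = V → 0 ≤ st.2 → st.2 < V →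
      (l.foldl (fun (st : List Bool × Int) i =>
          if pvGet st.1 i = false then (dfsA adj (V.toNat + 1) i st.1, i) else st) st =
        l.foldl (fun (st : List Bool × Int) i =>
          if pvGet st.1 i = false
          then (dfsA (adj.map (List.map (normI V))) (V.toNat + 1) i st.1, i) else st) st) ∧
      (((l.foldl (fun (st : List Bool × Int) i =>
          if pvGet st.1 i = false then (dfsA adj (V.toNat + 1) i st.1, i) else st) st).1.length : Int) = V) ∧
      0 ≤ (l.foldl (fun (st : List Bool × Int) i =>
          if pvGet st.1 i = false then (dfsA adj (V.toNat + 1) i st.1, i) else st) st).2 ∧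
      (l.foldl (fun (st : List Bool × Int) i =>
          if pvGet st.1 i = false then (dfsA adj (V.toNat + 1) i st.1, i) else st) st).2 < V := by
    intro l
    induction l with
    | nil => intro _ st h1 h2 h3; exact ⟨rfl, h1, h2, h3⟩
    | cons x l ihl =>
      intro hl st h1 h2 h3
      have hx := hl x (by simp)
      simp only [List.foldl_cons]
      by_cases h : pvGet st.1 x = false
      · rw [if_pos h, if_pos h]
        have hnx : dfsA adj (V.toNat + 1) x st.1 =
            dfsA (adj.map (List.map (normI V))) (V.toNat + 1) x st.1 := by
          rw [normA V adj hV hVlen HL (V.toNat + 1) x st.1 (Or.inl hx) h1,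
            show normI V x = x from if_neg (by omega)]
        rw [← hnx]
        exact ihl (fun z hz => hl z (by simp [hz])) _ (by rw [dfsA_length]; exact h1) hx.1 hx.2
      · rw [if_neg h, if_neg h]
        exact ihl (fun z hz => hl z (by simp [hz])) st h1 h2 h3
  have hl : ∀ x ∈ PySem.List.pyRange 0 V 1, 0 ≤ x ∧ x < V := by
    intro x hx; exact PySem.List.mem_pyRange_one.1 hx
  obtain ⟨heq, hlen, hm0, hm1⟩ := hfold (PySem.List.pyRange 0 V 1) hl
    (List.replicate V.toNat false, 0) (by simp; omega) le_rfl hV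
  rw [← heq]
  have hphase2 : dfsA adj (V.toNat + 1)
      ((PySem.List.pyRange 0 V 1).foldl (fun (st : List Bool × Int) i =>
        if pvGet st.1 i = false then (dfsA adj (V.toNat + 1) i st.1, i) else st)
        (List.replicate V.toNat false, 0)).2 (List.replicate V.toNat false) =
      dfsA (adj.map (List.map (normI V))) (V.toNat + 1)
      ((PySem.List.pyRange 0 V 1).foldl (fun (st : List Bool × Int) i =>
        if pvGet st.1 i = false then (dfsA adj (V.toNat + 1) i st.1, i) else st)
        (List.replicate V.toNat false, 0)).2 (List.replicate V.toNat false) := by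
    rw [normA V adj hV hVlen HL _ _ _ (Or.inl ⟨hm0, hm1⟩) (by simp; omega),
      show normI V _ = _ from if_neg (by omega)]
  rw [← hphase2]

theorem portB_norm (V : Int) (adj : List (List Int)) (hV : 1 ≤ V)
    (hVlen : V ≤ (adj.length : Int))
    (HL : ∀ row ∈ adj.take V.toNat, ∀ y ∈ row, Lab V adj.length y) :
    findMotherVertex_alt V adj = findMotherVertex_alt V (adj.map (List.map (normI V))) := by
  simp only [findMotherVertex_alt]
  have hfold : ∀ (l : List Int), (∀ x ∈ l, 0 ≤ x ∧ x < V) → ∀ (st : Int × List Bool),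
      (st.2.length : Int) = V → 0 ≤ st.1 → st.1 < V →
      (l.foldl (fun (st : Int × List Bool) i =>
          if pvGet st.2 i = false then (i, bfsB adj (V.toNat + 2) i st.2) else st) st =
        l.foldl (fun (st : Int × List Bool) i =>
          if pvGet st.2 i = false
          then (i, bfsB (adj.map (List.map (normI V))) (V.toNat + 2) i st.2) else st) st) ∧
      (((l.foldl (fun (st : Int × List Bool) i =>
          if pvGet st.2 i = false then (i, bfsB adj (V.toNat + 2) i st.2) else st) st).2.length : Int) = V) ∧
      0 ≤ (l.foldl (fun (st : Int × List Bool) i =>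
          if pvGet st.2 i = false then (i, bfsB adj (V.toNat + 2) i st.2) else st) st).1 ∧
      (l.foldl (fun (st : Int × List Bool) i =>
          if pvGet st.2 i = false then (i, bfsB adj (V.toNat + 2) i st.2) else st) st).1 < V := by
    intro l
    induction l with
    | nil => intro _ st h1 h2 h3; exact ⟨rfl, h1, h2, h3⟩
    | cons x l ihl =>
      intro hl st h1 h2 h3
      have hx := hl x (by simp)
      simp only [List.foldl_cons]
      by_cases h : pvGet st.2 x = false
      · rw [if_pos h, if_pos h]
        have hnx : bfsB adj (V.toNat + 2) x st.2 =
            bfsB (adj.map (List.map (normI V))) (V.toNat + 2) x st.2 := by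
          rw [normB V adj hV hVlen HL (V.toNat + 2) x st.2 (Or.inl hx) h1,
            show normI V x = x from if_neg (by omega)]
        rw [← hnx]
        have hlen' : ((bfsB adj (V.toNat + 2) x st.2).length : Int) = V := by
          unfold bfsB; rw [bfsLoop_len, length_pvSet]; exact h1
        exact ihl (fun z hz => hl z (by simp [hz])) _ hlen' hx.1 hx.2
      · rw [if_neg h, if_neg h]
        exact ihl (fun z hz => hl z (by simp [hz])) st h1 h2 h3
  have hl : ∀ x ∈ PySem.List.pyRange 0 V 1, 0 ≤ x ∧ x < V := by
    intro x hx; exact PySem.List.mem_pyRange_one.1 hx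
  obtain ⟨heq, hlen, hm0, hm1⟩ := hfold (PySem.List.pyRange 0 V 1) hl
    (0, List.replicate V.toNat false) (by simp; omega) le_rfl hV
  rw [← heq]
  have hphase2 : bfsB adj (V.toNat + 2)
      ((PySem.List.pyRange 0 V 1).foldl (fun (st : Int × List Bool) i =>
        if pvGet st.2 i = false then (i, bfsB adj (V.toNat + 2) i st.2) else st)
        (0, List.replicate V.toNat false)).1 (List.replicate V.toNat false) =
      bfsB (adj.map (List.map (normI V))) (V.toNat + 2)
      ((PySem.List.pyRange 0 V 1).foldl (fun (st : Int × List Bool) i =>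
        if pvGet st.2 i = false then (i, bfsB adj (V.toNat + 2) i st.2) else st)
        (0, List.replicate V.toNat false)).1 (List.replicate V.toNat false) := by
    rw [normB V adj hV hVlen HL _ _ _ (Or.inl ⟨hm0, hm1⟩) (by simp; omega),
      show normI V _ = _ from if_neg (by omega)]
  rw [← hphase2]

-- ===== VERDICT (by name: the statement is the Claim_ definition above) =====
theorem findMotherVertex_spec : Claim_equal_findMotherVertex := by
  intro V adj _ hpre
  obtain ⟨hV, hVlen, hrows⟩ := hpre
  unfold Spec_findMotherVertex
  have HL : ∀ row ∈ adj.take V.toNat, ∀ y ∈ row, Lab V adj.length y := by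
    intro row hr y hy
    obtain ⟨h1, h2, h3⟩ := hrows row hr y hy
    by_cases h : y < 0
    · exact Or.inr ⟨h1, h, h3 h⟩
    · exact Or.inl ⟨by omega, h2⟩
  rw [portA_norm V adj hV hVlen HL, portB_norm V adj hV hVlen HL]
  have hrowsN : ∀ row ∈ (adj.map (List.map (normI V))).take V.toNat, ∀ z ∈ row,
      0 ≤ z ∧ z < V := by
    intro row hr z hz
    rw [← List.map_take] at hr
    obtain ⟨row0, hr0, rfl⟩ := List.mem_map.1 hr
    obtain ⟨y, hy0, rfl⟩ := List.mem_map.1 hz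
    exact lab_norm_range hV (HL row0 hr0 y hy0)
  exact main_eq V (adj.map (List.map (normI V))) hV (by simpa using hVlen) hrowsN
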